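-- pv_equiv track=rewrite | github.com/RanGreidi/project_2 | DIAMOND/environment/utils.py | one_link_transmission_old
-- ===== SOURCE A (Python) =====
-- def one_link_transmission_old(c, packets):
--     """one transmission on channel with capacity c for flows with packets packets
--     @param c: link's capacity
--     @param packets: list of flows load (packets)
--
--     returns list of packets remaining to be sent for each flow
--     """
--     if sum(packets) <= c:
--         return [0] * len(packets)
--
--     count = len(packets) - len([p for p in packets if p == 0]) # counts how many transmit on the same link
--     q = c // count  # c / count
--     r = c % count   # 0
--     new_packs = []
--     for p in packets:
--         new_packs.append(p - min(p, q))
--         if p > 0: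
--             r += q - min(p, q)
--     i = 0
--     while r > 0 and i < len(new_packs):
--         if new_packs[i] > 0:
--             rem = min(r, new_packs[i])
--             new_packs[i] -= rem
--             r -= rem
--         i += 1
--     return new_packs
-- ===== SOURCE B (Python) =====
-- def one_link_transmission_old(c, packets):
--     """one transmission on channel with capacity c for flows with packets packets
--     returns list of packets remaining to be sent for each flow"""
--     if sum(packets) <= c:
--         return [0] * len(packets)
--     count = sum(1 for p in packets if p != 0)
--     q, r = divmod(c, count)
--     r += sum(q - min(p, q) for p in packets if p > 0)
--     out = []
--     acc = 0
--     for p in packets: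
--         e = max(p - q, 0)
--         acc += e
--         out.append(min(e, max(acc - r, 0)))
--     return out
-- ===== Notes on version B (the rewrite author's own statement) =====
-- stated objective: alternative
-- what changed: Replaces A's sentinel-driven while-loop that drains the leftover r across the list in place with a single pass that computes each output arithmetically from the running prefix sum of the excesses: out_i = min(e_i, max(prefix_i - r, 0)); r itself is computed as one divmod plus a comprehension sum instead of being threaded through the building loop.
-- outside the precondition, e.g. on one_link_transmission_old(-1, [0, 0]): A raises ZeroDivisionError, B raises ZeroDivisionError
import Mathlib
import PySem

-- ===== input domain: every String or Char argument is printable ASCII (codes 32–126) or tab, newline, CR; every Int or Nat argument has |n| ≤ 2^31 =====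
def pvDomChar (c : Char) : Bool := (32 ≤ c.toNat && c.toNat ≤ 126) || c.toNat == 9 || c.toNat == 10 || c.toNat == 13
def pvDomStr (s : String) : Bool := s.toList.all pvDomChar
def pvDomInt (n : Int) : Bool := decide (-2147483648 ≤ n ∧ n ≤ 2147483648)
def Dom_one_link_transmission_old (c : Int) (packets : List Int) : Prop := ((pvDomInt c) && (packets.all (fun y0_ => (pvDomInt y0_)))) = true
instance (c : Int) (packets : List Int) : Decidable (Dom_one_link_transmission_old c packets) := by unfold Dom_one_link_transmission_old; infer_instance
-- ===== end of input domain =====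

-- B replaces A's while-loop drain of the leftover r with a one-pass prefix-sum formula
-- out_i = min(e_i, max(prefix_i - r, 0)); same cost, different structure (objective: alternative).

-- ===== PORT A =====
-- the while loop of A: drains r left-to-right from the positive entries
def pvDrainA (r : Int) (xs : List Int) : List Int :=
  match xs with
  | [] => []
  | x :: rest =>
    if r > 0 then
      if x > 0 then (x - min r x) :: pvDrainA (r - min r x) rest
      else x :: pvDrainA r rest
    else x :: rest

def one_link_transmission_old (c : Int) (packets : List Int) : List Int :=
  if packets.sum ≤ c then List.replicate packets.length 0
  else
    let count : Int := (packets.length : Int) - ((packets.filter (fun p => p == 0)).length : Int)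
    let q := PySem.Int.floordiv c count
    let r0 := PySem.Int.mod c count
    let st := packets.foldl (fun (st : List Int × Int) p =>
        (st.1 ++ [p - min p q], if p > 0 then st.2 + (q - min p q) else st.2)) ([], r0)
    pvDrainA st.2 st.1

-- ===== PORT B =====
def one_link_transmission_old_alt (c : Int) (packets : List Int) : List Int :=
  if packets.sum ≤ c then List.replicate packets.length 0
  else
    let count : Int := ((packets.filter (fun p => p != 0)).length : Int)
    let q := PySem.Int.floordiv c count
    let r := PySem.Int.mod c count +
      (packets.filter (fun p => decide (p > 0))).foldl (fun s p => s + (q - min p q)) 0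
    (packets.foldl (fun (st : List Int × Int) p =>
        let e := max (p - q) 0
        let acc := st.2 + e
        (st.1 ++ [min e (max (acc - r) 0)], acc)) ([], 0)).1

-- ===== PRECONDITION & SPEC =====
-- Pre_ excludes exactly the inputs where Python A raises ZeroDivisionError (count == 0):
-- sum(packets) > c while every packet is 0 (B raises there as well).
def Pre_one_link_transmission_old (c : Int) (packets : List Int) : Prop :=
  ¬ (packets.sum > c ∧ ∀ p ∈ packets, p = 0)
instance (c : Int) (packets : List Int) : Decidable (Pre_one_link_transmission_old c packets) := by
  unfold Pre_one_link_transmission_old; infer_instance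
def pvWitness_one_link_transmission_old : Int × List Int := (5, [3, 0, 4])

def Spec_one_link_transmission_old (c : Int) (packets : List Int) (out : List Int) : Prop := out = one_link_transmission_old_alt c packets
instance (c : Int) (packets : List Int) (out : List Int) : Decidable (Spec_one_link_transmission_old c packets out) := by unfold Spec_one_link_transmission_old; infer_instance

-- ===== CLAIM (what is proved, stated in full; the proofs are below) =====
def Claim_equal_one_link_transmission_old : Prop := ∀ (c : Int) (packets : List Int), Dom_one_link_transmission_old c packets → Pre_one_link_transmission_old c packets → Spec_one_link_transmission_old c packets (one_link_transmission_old c packets)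

-- ===== LEMMAS AND PROOFS =====

theorem pvDrainA_zero (xs : List Int) : pvDrainA 0 xs = xs := by
  cases xs <;> simp [pvDrainA]

theorem pvDrainA_cons (r x : Int) (rest : List Int) :
    pvDrainA r (x :: rest)
      = if r > 0 then
          (if x > 0 then (x - min r x) :: pvDrainA (r - min r x) rest
           else x :: pvDrainA r rest)
        else x :: rest := rfl

-- A's building loop, characterised: list part is a map, r part is r0 + sum over positive entries.
theorem pvAfold (q : Int) (ps : List Int) : ∀ (l0 : List Int) (r0 : Int),
    ps.foldl (fun (st : List Int × Int) p =>
        (st.1 ++ [p - min p q], if p > 0 then st.2 + (q - min p q) else st.2)) (l0, r0)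
      = (l0 ++ ps.map (fun p => p - min p q),
         r0 + (ps.filter (fun p => decide (p > 0))).foldl (fun s p => s + (q - min p q)) 0) := by
  induction ps with
  | nil => intro l0 r0; simp
  | cons p ps ih =>
    intro l0 r0
    by_cases hp : p > 0
    · simp only [List.foldl_cons, List.filter_cons, hp, decide_true, if_true, ih]
      refine Prod.ext (by simp) ?_
      simp only [PySem.List.foldl_add (g := fun p => q - min p q)]
      ring
    · simp [List.foldl_cons, hp, ih]

-- the comprehension sum in B is nonnegative (each term q - min p q ≥ 0)
theorem pvSum_nonneg (q : Int) (ps : List Int) :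
    0 ≤ ps.foldl (fun s p => s + (q - min p q)) 0 := by
  rw [PySem.List.foldl_add (g := fun p => q - min p q)]
  have : 0 ≤ (ps.map (fun p => q - min p q)).sum := by
    apply List.sum_nonneg
    intro x hx
    obtain ⟨p, _, rfl⟩ := List.mem_map.mp hx
    have := min_le_right p q
    omega
  omega

-- core lemma: B's prefix-sum pass equals A's drain loop applied to the mapped list
theorem pvLoopB_eq_drain (q r : Int) (ps : List Int) :
    ∀ (l0 : List Int) (acc : Int),
    (ps.foldl (fun (st : List Int × Int) p =>
        let e := max (p - q) 0
        let a := st.2 + e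
        (st.1 ++ [min e (max (a - r) 0)], a)) (l0, acc)).1
      = l0 ++ pvDrainA (max (r - acc) 0) (ps.map (fun p => p - min p q)) := by
  induction ps with
  | nil => intro l0 acc; simp [pvDrainA]
  | cons p ps ih =>
    intro l0 acc
    simp only [List.foldl_cons, List.map_cons]
    rw [ih]
    have he : p - min p q = max (p - q) 0 := by omega
    rw [← he, pvDrainA_cons]
    by_cases h1 : max (r - acc) 0 > 0
    · rw [if_pos h1]
      by_cases h2 : p - min p q > 0
      · rw [if_pos h2]
        simp only [List.append_assoc, List.singleton_append]
        congr 1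
        congr 1
        · omega
        · congr 1
          omega
      · rw [if_neg h2]
        simp only [List.append_assoc, List.singleton_append]
        congr 1
        congr 1
        · omega
        · congr 1
          omega
    · rw [if_neg h1]
      simp only [List.append_assoc, List.singleton_append]
      congr 1
      congr 1
      · omega
      · rw [show max (r - (acc + (p - min p q))) 0 = 0 by omega, pvDrainA_zero]

-- the two counts agree: len - #zeros = #nonzeros
theorem pvCount_eq (ps : List Int) :
    (ps.length : Int) - ((ps.filter (fun p => p == 0)).length : Int)
      = ((ps.filter (fun p => p != 0)).length : Int) := by
  induction ps with
  | nil => simp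
  | cons p ps ih =>
    by_cases hp : p = 0 <;> simp [hp] <;> omega

theorem pvCount_pos (ps : List Int) (h : ∃ p ∈ ps, p ≠ 0) :
    0 < ((ps.filter (fun p => p != 0)).length : Int) := by
  obtain ⟨p, hmem, hp⟩ := h
  have : p ∈ ps.filter (fun p => p != 0) := by
    rw [List.mem_filter]; exact ⟨hmem, by simpa using hp⟩
  have := List.length_pos_of_mem this
  omega

-- ===== VERDICT (by name: the statement is the Claim_ definition above) =====
theorem one_link_transmission_old_spec : Claim_equal_one_link_transmission_old := by
  unfold Claim_equal_one_link_transmission_old Spec_one_link_transmission_old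
  intro c packets _ hpre
  unfold one_link_transmission_old one_link_transmission_old_alt
  by_cases hs : packets.sum ≤ c
  · simp [hs]
  · simp only [if_neg hs]
    unfold Pre_one_link_transmission_old at hpre
    push Not at hpre
    have hex : ∃ p ∈ packets, p ≠ 0 := hpre (by omega)
    have hcnt := pvCount_eq packets
    have hpos := pvCount_pos packets hex
    rw [hcnt]
    set count : Int := ((packets.filter (fun p => p != 0)).length : Int) with hc
    set q := PySem.Int.floordiv c count with hq
    have hmod : 0 ≤ PySem.Int.mod c count := by
      rw [PySem.Int.mod_eq_emod_of_pos hpos]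
      exact Int.emod_nonneg c (by omega)
    have hr : 0 ≤ PySem.Int.mod c count +
        (packets.filter (fun p => decide (p > 0))).foldl (fun s p => s + (q - min p q)) 0 := by
      have := pvSum_nonneg q (packets.filter (fun p => decide (p > 0)))
      omega
    rw [pvAfold, pvLoopB_eq_drain _ _ _]
    simp only [List.nil_append, sub_zero]
    rw [max_eq_left hr]
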